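-- pv_equiv track=rewrite | github.com/croner01/logoscope | ai-service/ai/langchain_runtime/service.py | _collapse_unquoted_whitespace
-- ===== SOURCE A (Python) =====
-- from typing import Any, Callable, Dict, List, Optional
--
-- def _collapse_unquoted_whitespace(text: str) -> str:
--     chars: List[str] = []
--     quote_char = ""
--     escaped = False
--     pending_space = False
--
--     for char in text:
--         if escaped:
--             chars.append(char)
--             escaped = False
--             continue
--         if char == "\\":
--             chars.append(char)
--             escaped = True
--             continue
--         if quote_char:
--             chars.append(char)
--             if char == quote_char:
--                 quote_char = ""
--             continue
--         if char in {"'", '"'}: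
--             if pending_space and chars:
--                 chars.append(" ")
--             pending_space = False
--             chars.append(char)
--             quote_char = char
--             continue
--         if char.isspace():
--             pending_space = True
--             continue
--         if pending_space and chars:
--             chars.append(" ")
--         pending_space = False
--         chars.append(char)
--
--     return "".join(chars).strip()
-- ===== SOURCE B (Python) =====
-- import re
--
-- # One ordered alternation: quoted span (escapes kept), escape pair, whitespace run, plain run.
-- _TOKEN = re.compile(
--     r'"(?:\\[\s\S]|[^"\\])*"?'
--     r"|'(?:\\[\s\S]|[^'\\])*'?"
--     r'|\\[\s\S]?'
--     r'|\s+'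
--     r'|[^\s\'"\\]+'
-- )
--
-- def _collapse_unquoted_whitespace(text: str) -> str:
--     out = []
--     pending = False
--     for tok in _TOKEN.findall(text):
--         if tok[0].isspace():
--             pending = True
--         elif tok[0] == '\\':
--             out.append(tok)          # escape sequences pass through; a pending space stays pending
--         else:
--             if pending:
--                 out.append(' ')
--             pending = False
--             out.append(tok)
--     return ''.join(out).strip()
-- ===== Notes on version B (the rewrite author's own statement) =====
-- stated objective: faster
-- what changed: Replaced the per-character four-flag state machine with a compiled-regex tokenizer (quoted span / escape pair / whitespace run / plain run) followed by a simple token-level fold that emits one space per pending whitespace run.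
import Mathlib
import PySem

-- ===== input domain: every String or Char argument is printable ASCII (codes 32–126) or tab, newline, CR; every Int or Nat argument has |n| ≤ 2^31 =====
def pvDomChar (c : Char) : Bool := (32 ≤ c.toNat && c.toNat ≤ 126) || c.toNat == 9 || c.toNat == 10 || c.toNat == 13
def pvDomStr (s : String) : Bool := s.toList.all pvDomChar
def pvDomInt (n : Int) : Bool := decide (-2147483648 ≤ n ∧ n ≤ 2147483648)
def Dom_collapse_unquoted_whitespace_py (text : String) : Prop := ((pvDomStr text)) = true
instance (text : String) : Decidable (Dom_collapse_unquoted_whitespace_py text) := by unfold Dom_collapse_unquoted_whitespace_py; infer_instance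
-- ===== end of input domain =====

-- B replaces A's per-character four-flag state machine by a regex tokenizer
-- (quoted span / escape pair / whitespace run / plain run) plus a token-level fold;
-- same O(n) asymptotics, measurably faster by the compiled-regex constant factor.

-- ===== PORT A =====
-- state = (chars, quote_char as Option Char ("" = none), escaped, pending_space)
def pvAStep : (List Char × Option Char × Bool × Bool) → Char → (List Char × Option Char × Bool × Bool)
  | (chars, quote, escaped, pending), c =>
    if escaped then (chars ++ [c], quote, false, pending)
    else if c = '\\' then (chars ++ [c], quote, true, pending)
    else
      match quote with
      | some q => (chars ++ [c], if c = q then (none : Option Char) else some q, false, pending)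
      | none =>
        if c = '\'' ∨ c = '"' then
          ((if pending ∧ chars ≠ [] then chars ++ [' '] else chars) ++ [c], some c, false, false)
        else if PySem.Chars.isspace c then
          (chars, none, false, true)
        else
          ((if pending ∧ chars ≠ [] then chars ++ [' '] else chars) ++ [c], none, false, false)

def collapse_unquoted_whitespace_py (text : String) : String :=
  PySem.Str.strip (String.ofList (text.toList.foldl pvAStep ([], none, false, false)).1)

-- ===== PORT B =====
-- Hand port of Source B's compiled regex (Lean has no regex engine; each alternation branch is
-- transcribed exactly, in the same order): the quoted-span branch "(?:\\[\s\S]|[^"\\])*"? is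
-- pvTakeQuoted, the escape branch \\[\s\S]? , the whitespace run \s+ and the plain run are the
-- branches of pvTokenize; pvEmitStep is Source B's loop body over the tokens.
def pvTakeQuoted (q : Char) : List Char → List Char × List Char
  | [] => ([], [])
  | c :: rest =>
    if c = '\\' then
      match rest with
      | [] => ([], ['\\'])                -- lone trailing backslash: not part of the quote token
      | d :: rest' => ('\\' :: d :: (pvTakeQuoted q rest').1, (pvTakeQuoted q rest').2)
    else if c = q then ([c], rest)
    else (c :: (pvTakeQuoted q rest).1, (pvTakeQuoted q rest).2)

theorem pvTakeQuoted_len (q : Char) : ∀ l, (pvTakeQuoted q l).2.length ≤ l.length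
  | [] => by simp [pvTakeQuoted]
  | c :: rest => by
    by_cases h : c = '\\'
    · subst h
      cases rest with
      | nil => simp [pvTakeQuoted]
      | cons d rest' =>
        have := pvTakeQuoted_len q rest'
        rw [pvTakeQuoted.eq_def]
        simpa using by omega
    · by_cases hq : c = q
      · subst hq
        rw [pvTakeQuoted.eq_def]
        simp [h]
      · have := pvTakeQuoted_len q rest
        rw [pvTakeQuoted.eq_def]
        simp only [if_neg h, if_neg hq]
        simpa using by omega

def pvPlain (c : Char) : Bool :=
  !(PySem.Chars.isspace c) && c ≠ '\'' && c ≠ '"' && c ≠ '\\'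

def pvTokenize : List Char → List (List Char)
  | [] => []
  | c :: rest =>
    if c = '"' ∨ c = '\'' then
      (c :: (pvTakeQuoted c rest).1) :: pvTokenize (pvTakeQuoted c rest).2
    else if c = '\\' then
      match rest with
      | [] => [['\\']]
      | d :: r => ['\\', d] :: pvTokenize r
    else if PySem.Chars.isspace c then
      (c :: rest.takeWhile PySem.Chars.isspace) :: pvTokenize (rest.dropWhile PySem.Chars.isspace)
    else
      (c :: rest.takeWhile pvPlain) :: pvTokenize (rest.dropWhile pvPlain)
termination_by l => l.length
decreasing_by
  all_goals simp only [List.length_cons]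
  all_goals first
    | (have := pvTakeQuoted_len c rest; omega)
    | omega
    | (have := List.length_dropWhile_le (p := PySem.Chars.isspace) (l := rest); omega)
    | (have := List.length_dropWhile_le (p := pvPlain) (l := rest); omega)

-- Source B's loop body; tokens are never [] (the [] arm is unreachable and returns the state unchanged)
def pvEmitStep (st : List Char × Bool) (t : List Char) : List Char × Bool :=
  match t with
  | [] => st
  | c :: _ =>
    if PySem.Chars.isspace c then (st.1, true)
    else if c = '\\' then (st.1 ++ t, st.2)
    else ((if st.2 then st.1 ++ [' '] else st.1) ++ t, false)

def collapse_unquoted_whitespace_py_alt (text : String) : String :=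
  PySem.Str.strip (String.ofList ((pvTokenize text.toList).foldl pvEmitStep ([], false)).1)

-- ===== PRECONDITION & SPEC =====
def Spec_collapse_unquoted_whitespace_py (text : String) (out : String) : Prop := out = collapse_unquoted_whitespace_py_alt text
instance (text : String) (out : String) : Decidable (Spec_collapse_unquoted_whitespace_py text out) := by unfold Spec_collapse_unquoted_whitespace_py; infer_instance

-- ===== CLAIM (what is proved, stated in full; the proofs are below) =====
def Claim_equal_collapse_unquoted_whitespace_py : Prop := ∀ (text : String), Dom_collapse_unquoted_whitespace_py text → Spec_collapse_unquoted_whitespace_py text (collapse_unquoted_whitespace_py text)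

-- ===== LEMMAS AND PROOFS =====

-- A's step with the flush condition 'pending' alone (no 'chars ≠ []' test); agrees with pvAStep
-- whenever chars is nonempty (lemma pvA_eq_A').
def pvAStep' : (List Char × Option Char × Bool × Bool) → Char → (List Char × Option Char × Bool × Bool)
  | (chars, quote, escaped, pending), c =>
    if escaped then (chars ++ [c], quote, false, pending)
    else if c = '\\' then (chars ++ [c], quote, true, pending)
    else
      match quote with
      | some q => (chars ++ [c], if c = q then (none : Option Char) else some q, false, pending)
      | none =>
        if c = '\'' ∨ c = '"' then
          ((if pending then chars ++ [' '] else chars) ++ [c], some c, false, false)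
        else if PySem.Chars.isspace c then
          (chars, none, false, true)
        else
          ((if pending then chars ++ [' '] else chars) ++ [c], none, false, false)


theorem pv_bs_ws : PySem.Chars.isspace '\\' = false := by decide

-- c with isspace is none of the special characters
theorem pv_ws_facts {c : Char} (h : PySem.Chars.isspace c = true) :
    ¬c = '\\' ∧ ¬(c = '\'' ∨ c = '"') := by
  refine ⟨?_, ?_⟩
  · rintro rfl; revert h; decide
  · rintro (rfl | rfl) <;> revert h <;> decide

-- A's step and the always-flush variant agree while chars is nonempty, and keep it nonempty
theorem pvA_eq_A' : ∀ (l out : List Char) (q : Option Char) (esc pend : Bool), out ≠ [] →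
    List.foldl pvAStep (out, q, esc, pend) l = List.foldl pvAStep' (out, q, esc, pend) l
  | [], _, _, _, _, _ => rfl
  | c :: l, out, q, esc, pend, h => by
    have hstep : pvAStep (out, q, esc, pend) c = pvAStep' (out, q, esc, pend) c := by
      simp [pvAStep, pvAStep', h]
    have hne : (pvAStep' (out, q, esc, pend) c).1 ≠ [] := by
      simp only [pvAStep']
      cases q <;> split_ifs <;> simp [h]
    simp only [List.foldl_cons, hstep]
    rcases hS : pvAStep' (out, q, esc, pend) c with ⟨o', q', e', p'⟩
    rw [hS] at hne
    exact pvA_eq_A' l o' q' e' p' hne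

-- B's emit fold only appends: a fixed prefix of the accumulator passes through
theorem pvEmit_prefix : ∀ (ts : List (List Char)) (x y : List Char) (p : Bool),
    List.foldl pvEmitStep (x ++ y, p) ts =
      (x ++ (List.foldl pvEmitStep (y, p) ts).1, (List.foldl pvEmitStep (y, p) ts).2)
  | [], x, y, p => rfl
  | t :: ts, x, y, p => by
    have hstep : pvEmitStep (x ++ y, p) t =
        (x ++ (pvEmitStep (y, p) t).1, (pvEmitStep (y, p) t).2) := by
      cases t with
      | nil => rfl
      | cons c t' => simp only [pvEmitStep]; split_ifs <;> simp
    simp only [List.foldl_cons, hstep]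
    rcases hS : pvEmitStep (y, p) t with ⟨o', p'⟩
    exact pvEmit_prefix ts x o' p'

-- a run of whitespace only re-sets the (already set) pending flag: pvAStep version
theorem pvA_ws_run : ∀ (w l out : List Char), (∀ c ∈ w, PySem.Chars.isspace c = true) →
    List.foldl pvAStep (out, none, false, true) (w ++ l) =
      List.foldl pvAStep (out, none, false, true) l
  | [], _, _, _ => rfl
  | c :: w, l, out, h => by
    obtain ⟨h1, h2⟩ := pv_ws_facts (h c (by simp))
    have hstep : pvAStep (out, none, false, true) c = (out, none, false, true) := by
      simp [pvAStep, h1, h2, h c (by simp)]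
    simp only [List.cons_append, List.foldl_cons, hstep]
    exact pvA_ws_run w l out (fun c hc => h c (List.mem_cons_of_mem _ hc))

-- the same for the always-flush variant
theorem pvA'_ws_run : ∀ (w l out : List Char), (∀ c ∈ w, PySem.Chars.isspace c = true) →
    List.foldl pvAStep' (out, none, false, true) (w ++ l) =
      List.foldl pvAStep' (out, none, false, true) l
  | [], _, _, _ => rfl
  | c :: w, l, out, h => by
    obtain ⟨h1, h2⟩ := pv_ws_facts (h c (by simp))
    have hstep : pvAStep' (out, none, false, true) c = (out, none, false, true) := by
      simp [pvAStep', h1, h2, h c (by simp)]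
    simp only [List.cons_append, List.foldl_cons, hstep]
    exact pvA'_ws_run w l out (fun c hc => h c (List.mem_cons_of_mem _ hc))

-- a run of plain characters is appended verbatim (pending already cleared)
theorem pvA'_plain_run : ∀ (w l out : List Char), (∀ c ∈ w, pvPlain c = true) →
    List.foldl pvAStep' (out, none, false, false) (w ++ l) =
      List.foldl pvAStep' (out ++ w, none, false, false) l
  | [], l, out, _ => by simp
  | c :: w, l, out, h => by
    have hc := h c (by simp)
    simp only [pvPlain, Bool.and_eq_true, decide_eq_true_eq, Bool.not_eq_true'] at hc
    obtain ⟨⟨⟨hws, h1⟩, h2⟩, h3⟩ := hc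
    have hor : ¬(c = '\'' ∨ c = '"') := by rintro (rfl | rfl); exacts [h1 rfl, h2 rfl]
    have hstep : pvAStep' (out, none, false, false) c = (out ++ [c], none, false, false) := by
      simp [pvAStep', h3, hor, hws]
    simp only [List.cons_append, List.foldl_cons, hstep]
    have := pvA'_plain_run w l (out ++ [c]) (fun c hc => h c (List.mem_cons_of_mem _ hc))
    simpa using this

-- whether the quoted span opened by q eventually closes
def pvClosed (q : Char) : List Char → Bool
  | [] => false
  | c :: rest =>
    if c = '\\' then
      match rest with
      | [] => false
      | _ :: r => pvClosed q r
    else if c = q then true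
    else pvClosed q rest

theorem pvTakeQuoted_unclosed (q : Char) : ∀ l, pvClosed q l = false →
    (pvTakeQuoted q l).2 = [] ∨ (pvTakeQuoted q l).2 = ['\\']
  | [], _ => by simp [pvTakeQuoted]
  | c :: rest, h => by
    by_cases hb : c = '\\'
    · subst hb
      cases rest with
      | nil => rw [pvTakeQuoted.eq_def]; simp
      | cons d rest' =>
        rw [pvClosed.eq_def] at h; simp at h
        rw [pvTakeQuoted.eq_def]; simp
        exact pvTakeQuoted_unclosed q rest' h
    · by_cases hq : c = q
      · exfalso
        rw [pvClosed.eq_def] at h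
        simp only [if_neg hb, if_pos hq] at h
        simp at h
      · rw [pvClosed.eq_def] at h
        simp only [if_neg hb, if_neg hq] at h
        rw [pvTakeQuoted.eq_def]; simp [hb, hq]
        exact pvTakeQuoted_unclosed q rest h

-- A' inside a quoted span consumes exactly the regex's quote-token body
theorem pvA'_quote_run : ∀ (l : List Char) (q : Char) (out : List Char) (pend : Bool),
    q = '"' ∨ q = '\'' →
    List.foldl pvAStep' (out, some q, false, pend) l =
      List.foldl pvAStep' (out ++ (pvTakeQuoted q l).1,
        (if pvClosed q l then none else some q), false, pend) (pvTakeQuoted q l).2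
  | [], q, out, pend, _ => by simp [pvTakeQuoted, pvClosed]
  | c :: rest, q, out, pend, hq => by
    have hqb : ¬q = '\\' := by rcases hq with rfl | rfl <;> decide
    by_cases hb : c = '\\'
    · subst hb
      cases rest with
      | nil =>
        rw [pvTakeQuoted.eq_def, pvClosed.eq_def]
        simp [pvAStep']
      | cons d rest' =>
        rw [pvTakeQuoted.eq_def, pvClosed.eq_def]
        simp only [List.foldl_cons]
        have h1 : pvAStep' (out, some q, false, pend) '\\' = (out ++ ['\\'], some q, true, pend) := by
          simp [pvAStep']
        have h2 : pvAStep' (out ++ ['\\'], some q, true, pend) d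
            = (out ++ ['\\'] ++ [d], some q, false, pend) := by
          simp [pvAStep']
        rw [h1, h2]
        have := pvA'_quote_run rest' q (out ++ ['\\'] ++ [d]) pend hq
        simpa [List.append_assoc] using this
    · by_cases hc : c = q
      · subst hc
        rw [pvTakeQuoted.eq_def, pvClosed.eq_def]
        simp only [if_neg hb, List.foldl_cons]
        have h1 : pvAStep' (out, some c, false, pend) c = (out ++ [c], none, false, pend) := by
          simp [pvAStep', hb]
        rw [h1]
        simp
      · rw [pvTakeQuoted.eq_def, pvClosed.eq_def]
        simp only [if_neg hb, if_neg hc, List.foldl_cons]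
        have h1 : pvAStep' (out, some q, false, pend) c = (out ++ [c], some q, false, pend) := by
          simp [pvAStep', hb, hc]
        rw [h1]
        have := pvA'_quote_run rest q (out ++ [c]) pend hq
        simpa [List.append_assoc] using this

-- head-character facts for tokens
theorem pv_quote_head_facts {c : Char} (hq : c = '"' ∨ c = '\'') :
    PySem.Chars.isspace c = false ∧ ¬c = '\\' := by
  rcases hq with rfl | rfl <;> exact ⟨by decide, by decide⟩

-- main lemma: the always-flush machine equals B's token fold, from any accumulator
theorem pvA'_eq_emit : ∀ (n : Nat) (l : List Char), l.length ≤ n → ∀ (out : List Char) (pend : Bool),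
    (List.foldl pvAStep' (out, none, false, pend) l).1 =
      (List.foldl pvEmitStep (out, pend) (pvTokenize l)).1 := by
  intro n
  induction n with
  | zero =>
    intro l hl out pend
    have : l = [] := List.eq_nil_of_length_eq_zero (Nat.le_zero.mp hl)
    subst this; simp [pvTokenize]
  | succ m ih =>
    intro l hl out pend
    cases l with
    | nil => simp [pvTokenize]
    | cons c rest =>
      simp only [List.length_cons, Nat.succ_le_succ_iff] at hl
      by_cases hq : c = '"' ∨ c = '\''
      · -- quoted-span token
        obtain ⟨hws, hbs⟩ := pv_quote_head_facts hq
        have hq' : c = '\'' ∨ c = '"' := hq.symm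
        have hstep : pvAStep' (out, none, false, pend) c
            = ((if pend then out ++ [' '] else out) ++ [c], some c, false, false) := by
          simp [pvAStep', hbs, hq']
        rw [pvTokenize.eq_def]
        simp only [if_pos hq, List.foldl_cons, hstep]
        set out1 := (if pend then out ++ [' '] else out) with hout1
        rw [pvA'_quote_run rest c (out1 ++ [c]) false hq]
        have hemit : pvEmitStep (out, pend) (c :: (pvTakeQuoted c rest).1)
            = (out1 ++ c :: (pvTakeQuoted c rest).1, false) := by
          simp [pvEmitStep, hws, hbs, hout1]
        rw [hemit]
        have hassoc : out1 ++ [c] ++ (pvTakeQuoted c rest).1 = out1 ++ c :: (pvTakeQuoted c rest).1 := by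
          simp
        by_cases hcl : pvClosed c rest = true
        · rw [if_pos hcl, hassoc]
          exact ih (pvTakeQuoted c rest).2
            (le_trans (pvTakeQuoted_len c rest) hl) (out1 ++ c :: (pvTakeQuoted c rest).1) false
        · rw [if_neg hcl]
          rcases pvTakeQuoted_unclosed c rest (Bool.not_eq_true _ ▸ (by simpa using hcl)) with hr | hr
          · rw [hr, hassoc]; simp [pvTokenize]
          · rw [hr, hassoc]
            rw [pvTokenize.eq_def]
            have : ¬('\\' = '"' ∨ '\\' = '\'') := by decide
            simp only [List.foldl_cons, List.foldl_nil, if_neg this, reduceIte]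
            have h1 : pvAStep' (out1 ++ c :: (pvTakeQuoted c rest).1, some c, false, false) '\\'
                = (out1 ++ c :: (pvTakeQuoted c rest).1 ++ ['\\'], some c, true, false) := by
              simp [pvAStep']
            rw [h1]
            simp [pvEmitStep, pv_bs_ws]
      · by_cases hb : c = '\\'
        · -- escape token
          subst hb
          cases rest with
          | nil =>
            rw [pvTokenize.eq_def]
            simp only [if_neg hq, reduceIte]
            have h1 : pvAStep' (out, none, false, pend) '\\' = (out ++ ['\\'], none, true, pend) := by
              simp [pvAStep']
            simp [h1, pvEmitStep, pv_bs_ws]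
          | cons d r =>
            rw [pvTokenize.eq_def]
            simp only [if_neg hq, reduceIte, List.foldl_cons]
            have h1 : pvAStep' (out, none, false, pend) '\\' = (out ++ ['\\'], none, true, pend) := by
              simp [pvAStep']
            have h2 : pvAStep' (out ++ ['\\'], none, true, pend) d
                = (out ++ ['\\', d], none, false, pend) := by
              simp [pvAStep']
            rw [h1, h2]
            have hemit : pvEmitStep (out, pend) ['\\', d] = (out ++ ['\\', d], pend) := by
              simp [pvEmitStep, pv_bs_ws]
            rw [hemit]
            exact ih r (by simp at hl; omega) (out ++ ['\\', d]) pend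
        · by_cases hws : PySem.Chars.isspace c = true
          · -- whitespace-run token
            rw [pvTokenize.eq_def]
            simp only [if_neg hq, if_neg hb, if_pos hws, List.foldl_cons]
            have hq1 : ¬c = '\'' := fun h => hq (Or.inr h)
            have hq2 : ¬c = '"' := fun h => hq (Or.inl h)
            have h1 : pvAStep' (out, none, false, pend) c = (out, none, false, true) := by
              simp [pvAStep', hb, hq1, hq2, hws]
            rw [h1]
            have hrun : List.foldl pvAStep' (out, none, false, true) rest
                = List.foldl pvAStep' (out, none, false, true)
                    (rest.dropWhile PySem.Chars.isspace) := by
              conv_lhs => rw [← List.takeWhile_append_dropWhile (p := PySem.Chars.isspace) (l := rest)]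
              exact pvA'_ws_run _ _ out (fun c hc => List.mem_takeWhile_imp hc)
            rw [hrun]
            have hemit : pvEmitStep (out, pend) (c :: rest.takeWhile PySem.Chars.isspace)
                = (out, true) := by
              simp [pvEmitStep, hws]
            rw [hemit]
            exact ih (rest.dropWhile PySem.Chars.isspace)
              (le_trans (List.length_dropWhile_le _ _) hl) out true
          · -- plain-run token
            have hq1 : ¬c = '\'' := fun h => hq (Or.inr h)
            have hq2 : ¬c = '"' := fun h => hq (Or.inl h)
            rw [pvTokenize.eq_def]
            simp only [if_neg hq, if_neg hb, if_neg hws, List.foldl_cons]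
            have h1 : pvAStep' (out, none, false, pend) c
                = ((if pend then out ++ [' '] else out) ++ [c], none, false, false) := by
              simp [pvAStep', hb, hq1, hq2, by simpa using hws]
            rw [h1]
            set out1 := (if pend then out ++ [' '] else out) with hout1
            have hrun : List.foldl pvAStep' (out1 ++ [c], none, false, false) rest
                = List.foldl pvAStep' (out1 ++ [c] ++ rest.takeWhile pvPlain, none, false, false)
                    (rest.dropWhile pvPlain) := by
              conv_lhs => rw [← List.takeWhile_append_dropWhile (p := pvPlain) (l := rest)]
              exact pvA'_plain_run _ _ (out1 ++ [c]) (fun c hc => List.mem_takeWhile_imp hc)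
            rw [hrun]
            have hemit : pvEmitStep (out, pend) (c :: rest.takeWhile pvPlain)
                = (out1 ++ c :: rest.takeWhile pvPlain, false) := by
              simp [pvEmitStep, by simpa using hws, hb, hout1]
            rw [hemit]
            have hassoc : out1 ++ [c] ++ rest.takeWhile pvPlain
                = out1 ++ c :: rest.takeWhile pvPlain := by simp
            rw [hassoc]
            exact ih (rest.dropWhile pvPlain)
              (le_trans (List.length_dropWhile_le _ _) hl) (out1 ++ c :: rest.takeWhile pvPlain) false


-- from the empty accumulator, A and B agree up to one possible leading space
-- (A skips the flush only while chars is empty; B then emits a leading ' ' that strip removes)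
theorem pvQ : ∀ (n : Nat) (l : List Char), l.length ≤ n → ∀ (pend : Bool),
    (List.foldl pvEmitStep ([], pend) (pvTokenize l)).1
        = (List.foldl pvAStep ([], none, false, pend) l).1
    ∨ (List.foldl pvEmitStep ([], pend) (pvTokenize l)).1
        = ' ' :: (List.foldl pvAStep ([], none, false, pend) l).1 := by
  intro n
  induction n with
  | zero =>
    intro l hl pend
    have : l = [] := List.eq_nil_of_length_eq_zero (Nat.le_zero.mp hl)
    subst this; left; simp [pvTokenize]
  | succ m ih =>
    intro l hl pend
    cases l with
    | nil => left; simp [pvTokenize]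
    | cons c rest =>
      simp only [List.length_cons, Nat.succ_le_succ_iff] at hl
      by_cases hq : c = '"' ∨ c = '\''
      · -- quoted-span token: A skips the flush (chars = []), B flushes if pending
        obtain ⟨hws, hbs⟩ := pv_quote_head_facts hq
        have hq' : c = '\'' ∨ c = '"' := hq.symm
        have hstep : pvAStep ([], none, false, pend) c = ([c], some c, false, false) := by
          simp [pvAStep, hbs, hq']
        rw [pvTokenize.eq_def]
        simp only [if_pos hq, List.foldl_cons, hstep]
        have hemit : pvEmitStep ([], pend) (c :: (pvTakeQuoted c rest).1)
            = ((if pend then [' '] else []) ++ c :: (pvTakeQuoted c rest).1, false) := by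
          simp [pvEmitStep, hws, hbs]
        rw [hemit]
        have hA : (List.foldl pvAStep ([c], some c, false, false) rest).1
            = (List.foldl pvEmitStep (c :: (pvTakeQuoted c rest).1, false)
                (pvTokenize (pvTakeQuoted c rest).2)).1 ∨
              ((List.foldl pvAStep ([c], some c, false, false) rest).1
                = c :: (pvTakeQuoted c rest).1 ++ (pvTakeQuoted c rest).2
               ∧ ((pvTakeQuoted c rest).2 = [] ∨ (pvTakeQuoted c rest).2 = ['\\'])) := by
          rw [pvA_eq_A' rest [c] (some c) false false (by simp)]
          rw [pvA'_quote_run rest c [c] false hq]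
          by_cases hcl : pvClosed c rest = true
          · left
            rw [if_pos hcl]
            exact pvA'_eq_emit m (pvTakeQuoted c rest).2
              (le_trans (pvTakeQuoted_len c rest) hl) (c :: (pvTakeQuoted c rest).1) false
          · right
            rw [if_neg hcl]
            have hr := pvTakeQuoted_unclosed c rest (by simpa using hcl)
            refine ⟨?_, hr⟩
            rcases hr with hr | hr
            · rw [hr]; simp
            · rw [hr]
              have h1 : pvAStep' (c :: (pvTakeQuoted c rest).1, some c, false, false) '\\'
                  = (c :: (pvTakeQuoted c rest).1 ++ ['\\'], some c, true, false) := by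
                simp [pvAStep']
              simp [h1]
        have hB : (List.foldl pvEmitStep ((if pend then [' '] else []) ++ c :: (pvTakeQuoted c rest).1, false)
              (pvTokenize (pvTakeQuoted c rest).2)).1
            = (if pend then [' '] else [])
              ++ (List.foldl pvEmitStep (c :: (pvTakeQuoted c rest).1, false)
                    (pvTokenize (pvTakeQuoted c rest).2)).1 := by
          rw [pvEmit_prefix]
        rw [hB]
        have hBtail : (List.foldl pvEmitStep (c :: (pvTakeQuoted c rest).1, false)
              (pvTokenize (pvTakeQuoted c rest).2)).1
            = (List.foldl pvAStep ([c], some c, false, false) rest).1 := by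
          rcases hA with hA | ⟨hA, hr | hr⟩
          · exact hA.symm
          · rw [hA, hr]; simp [pvTokenize]
          · rw [hA, hr]
            rw [pvTokenize.eq_def]
            have hno : ¬('\\' = '"' ∨ '\\' = '\'') := by decide
            simp [pvEmitStep, pv_bs_ws]
        rw [hBtail]
        cases pend with
        | false => left; simp
        | true => right; simp
      · by_cases hb : c = '\\'
        · -- escape token: neither side flushes, pending is preserved
          subst hb
          cases rest with
          | nil =>
            rw [pvTokenize.eq_def]
            simp only [if_neg hq, reduceIte]
            have h1 : pvAStep ([], none, false, pend) '\\' = (['\\'], none, true, pend) := by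
              simp [pvAStep]
            left; simp [h1, pvEmitStep, pv_bs_ws]
          | cons d r =>
            rw [pvTokenize.eq_def]
            simp only [if_neg hq, reduceIte, List.foldl_cons]
            have h1 : pvAStep ([], none, false, pend) '\\' = (['\\'], none, true, pend) := by
              simp [pvAStep]
            have h2 : pvAStep (['\\'], none, true, pend) d = (['\\', d], none, false, pend) := by
              simp [pvAStep]
            rw [h1, h2]
            have hemit : pvEmitStep ([], pend) ['\\', d] = (['\\', d], pend) := by
              simp [pvEmitStep, pv_bs_ws]
            rw [hemit]
            left
            rw [pvA_eq_A' r ['\\', d] none false pend (by simp)]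
            exact (pvA'_eq_emit m r (by simp at hl; omega) ['\\', d] pend).symm
        · by_cases hws : PySem.Chars.isspace c = true
          · -- whitespace-run token: both just set pending
            have hq1 : ¬c = '\'' := fun h => hq (Or.inr h)
            have hq2 : ¬c = '"' := fun h => hq (Or.inl h)
            rw [pvTokenize.eq_def]
            simp only [if_neg hq, if_neg hb, if_pos hws, List.foldl_cons]
            have h1 : pvAStep ([], none, false, pend) c = ([], none, false, true) := by
              simp [pvAStep, hb, hq1, hq2, hws]
            rw [h1]
            have hrun : List.foldl pvAStep ([], none, false, true) rest
                = List.foldl pvAStep ([], none, false, true)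
                    (rest.dropWhile PySem.Chars.isspace) := by
              conv_lhs => rw [← List.takeWhile_append_dropWhile (p := PySem.Chars.isspace) (l := rest)]
              exact pvA_ws_run _ _ [] (fun c hc => List.mem_takeWhile_imp hc)
            rw [hrun]
            have hemit : pvEmitStep ([], pend) (c :: rest.takeWhile PySem.Chars.isspace)
                = ([], true) := by
              simp [pvEmitStep, hws]
            rw [hemit]
            exact ih (rest.dropWhile PySem.Chars.isspace)
              (le_trans (List.length_dropWhile_le _ _) hl) true
          · -- plain-run token: A skips the flush (chars = []), B flushes if pending
            have hq1 : ¬c = '\'' := fun h => hq (Or.inr h)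
            have hq2 : ¬c = '"' := fun h => hq (Or.inl h)
            rw [pvTokenize.eq_def]
            simp only [if_neg hq, if_neg hb, if_neg hws, List.foldl_cons]
            have h1 : pvAStep ([], none, false, pend) c = ([c], none, false, false) := by
              simp [pvAStep, hb, hq1, hq2, by simpa using hws]
            rw [h1]
            have hrun : List.foldl pvAStep ([c], none, false, false) rest
                = List.foldl pvAStep' ([c] ++ rest.takeWhile pvPlain, none, false, false)
                    (rest.dropWhile pvPlain) := by
              rw [pvA_eq_A' rest [c] none false false (by simp)]
              conv_lhs => rw [← List.takeWhile_append_dropWhile (p := pvPlain) (l := rest)]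
              exact pvA'_plain_run _ _ [c] (fun c hc => List.mem_takeWhile_imp hc)
            rw [hrun]
            have hemit : pvEmitStep ([], pend) (c :: rest.takeWhile pvPlain)
                = ((if pend then [' '] else []) ++ c :: rest.takeWhile pvPlain, false) := by
              simp [pvEmitStep, by simpa using hws, hb]
            rw [hemit]
            rw [pvEmit_prefix]
            have htail : (List.foldl pvAStep' ([c] ++ rest.takeWhile pvPlain, none, false, false)
                  (rest.dropWhile pvPlain)).1
                = (List.foldl pvEmitStep (c :: rest.takeWhile pvPlain, false)
                    (pvTokenize (rest.dropWhile pvPlain))).1 := by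
              exact pvA'_eq_emit m (rest.dropWhile pvPlain)
                (le_trans (List.length_dropWhile_le _ _) hl) (c :: rest.takeWhile pvPlain) false
            rw [htail]
            cases pend with
            | false => left; simp
            | true => right; simp

-- a leading space never survives strip
theorem pv_strip_space (cs : List Char) :
    PySem.Str.strip (String.ofList (' ' :: cs)) = PySem.Str.strip (String.ofList cs) := by
  simp [PySem.Str.strip, PySem.Chars.strip, PySem.Chars.lstrip, String.toList_ofList,
    (by decide : PySem.Chars.isspace ' ' = true)]

-- ===== VERDICT (by name: the statement is the Claim_ definition above) =====
theorem collapse_unquoted_whitespace_py_spec : Claim_equal_collapse_unquoted_whitespace_py := by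
  intro text _
  unfold Spec_collapse_unquoted_whitespace_py
  unfold collapse_unquoted_whitespace_py collapse_unquoted_whitespace_py_alt
  rcases pvQ text.toList.length text.toList le_rfl false with h | h
  · rw [h]
  · rw [h, pv_strip_space]
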